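-- pv_equiv track=rewrite | github.com/greenkey20/customer-segmentation-analysis | core/retail_data_loader.py | _create_column_mapping
-- ===== SOURCE A (Python) =====
-- def _create_column_mapping(columns: list) -> dict:
--     """실제 데이터 컬럼을 표준 컬럼명에 매핑"""
--
--     column_mapping = {
--         'invoice_no': None,
--         'stock_code': None,
--         'description': None,
--         'quantity': None,
--         'invoice_date': None,
--         'unit_price': None,
--         'customer_id': None,
--         'country': None
--     }
--
--     # 컬럼명 매핑 룰 (case-insensitive)
--     for col in columns:
--         col_lower = col.lower().replace(' ', '_').replace('-', '_')
--
--         if any(x in col_lower for x in ['invoice']) and any(x in col_lower for x in ['no', 'number', 'id']):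
--             column_mapping['invoice_no'] = col
--         elif any(x in col_lower for x in ['invoice']) and any(x in col_lower for x in ['date', 'time']):
--             column_mapping['invoice_date'] = col
--         elif any(x in col_lower for x in ['stock', 'item', 'product']) and any(x in col_lower for x in ['code', 'id', 'no']):
--             column_mapping['stock_code'] = col
--         elif any(x in col_lower for x in ['description', 'desc', 'name']) and 'customer' not in col_lower:
--             column_mapping['description'] = col
--         elif any(x in col_lower for x in ['quantity', 'qty']) and 'unit' not in col_lower:
--             column_mapping['quantity'] = col
--         elif any(x in col_lower for x in ['price', 'cost']) and any(x in col_lower for x in ['unit', 'per']):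
--             column_mapping['unit_price'] = col
--         elif any(x in col_lower for x in ['customer', 'client']) and any(x in col_lower for x in ['id', 'no']):
--             column_mapping['customer_id'] = col
--         elif any(x in col_lower for x in ['country', 'nation']):
--             column_mapping['country'] = col
--
--     return column_mapping
-- ===== SOURCE B (Python) =====
-- _KEYS = ['invoice_no', 'stock_code', 'description', 'quantity',
--          'invoice_date', 'unit_price', 'customer_id', 'country']
--
--
-- def _classify(cl):
--     """Return the standard key a (normalised) column name belongs to, or None."""
--     if 'invoice' in cl:
--         if 'no' in cl or 'number' in cl or 'id' in cl:
--             return 'invoice_no'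
--         if 'date' in cl or 'time' in cl:
--             return 'invoice_date'
--     if ('stock' in cl or 'item' in cl or 'product' in cl) and \
--             ('code' in cl or 'id' in cl or 'no' in cl):
--         return 'stock_code'
--     if ('description' in cl or 'desc' in cl or 'name' in cl) and 'customer' not in cl:
--         return 'description'
--     if ('quantity' in cl or 'qty' in cl) and 'unit' not in cl:
--         return 'quantity'
--     if ('price' in cl or 'cost' in cl) and ('unit' in cl or 'per' in cl):
--         return 'unit_price'
--     if ('customer' in cl or 'client' in cl) and ('id' in cl or 'no' in cl):
--         return 'customer_id'
--     if 'country' in cl or 'nation' in cl: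
--         return 'country'
--     return None
--
--
-- def _create_column_mapping(columns: list) -> dict:
--     # Tag every column once, then look up each standard key by a backward
--     # search (the last tagged column wins, as overwriting would).
--     tagged = [(col, _classify(col.lower().replace(' ', '_').replace('-', '_')))
--               for col in columns]
--     return {k: next((c for c, t in reversed(tagged) if t == k), None)
--             for k in _KEYS}
-- ===== Notes on version B (the rewrite author's own statement) =====
-- stated objective: alternative
-- what changed: Instead of one pass mutating a dict through an eight-branch elif chain, B first tags every column with its standard key via a classifier function, then builds the result by a per-key backward search over the tagged list (last tagged column wins, as overwriting would).
import Mathlib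
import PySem

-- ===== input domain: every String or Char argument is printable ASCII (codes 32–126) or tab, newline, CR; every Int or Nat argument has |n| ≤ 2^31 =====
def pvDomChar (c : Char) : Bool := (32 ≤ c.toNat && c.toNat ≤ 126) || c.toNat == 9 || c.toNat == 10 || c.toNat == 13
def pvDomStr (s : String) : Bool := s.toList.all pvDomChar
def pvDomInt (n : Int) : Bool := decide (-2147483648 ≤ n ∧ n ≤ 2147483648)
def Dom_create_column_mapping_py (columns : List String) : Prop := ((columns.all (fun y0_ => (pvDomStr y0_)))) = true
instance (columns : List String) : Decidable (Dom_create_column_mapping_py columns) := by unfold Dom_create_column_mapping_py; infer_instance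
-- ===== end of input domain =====

-- B: tag each column with its standard key via a classifier, then a per-key backward search
-- over the tagged list replaces A's single dict-mutating pass through an elif chain (alternative decomposition).

-- ===== PORT A =====
-- col.lower().replace(' ', '_').replace('-', '_')
def pvColLower (col : String) : String :=
  PySem.Str.replace (PySem.Str.replace (PySem.Str.lower col) " " "_") "-" "_"

def pvStepA (m : PySem.Dict String (Option String)) (col : String) : PySem.Dict String (Option String) :=
  let cl := pvColLower col
  if (["invoice"].any (fun x => PySem.Str.isIn x cl)) && (["no", "number", "id"].any (fun x => PySem.Str.isIn x cl)) then
    m.insert "invoice_no" (some col)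
  else if (["invoice"].any (fun x => PySem.Str.isIn x cl)) && (["date", "time"].any (fun x => PySem.Str.isIn x cl)) then
    m.insert "invoice_date" (some col)
  else if (["stock", "item", "product"].any (fun x => PySem.Str.isIn x cl)) && (["code", "id", "no"].any (fun x => PySem.Str.isIn x cl)) then
    m.insert "stock_code" (some col)
  else if (["description", "desc", "name"].any (fun x => PySem.Str.isIn x cl)) && !(PySem.Str.isIn "customer" cl) then
    m.insert "description" (some col)
  else if (["quantity", "qty"].any (fun x => PySem.Str.isIn x cl)) && !(PySem.Str.isIn "unit" cl) then
    m.insert "quantity" (some col)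
  else if (["price", "cost"].any (fun x => PySem.Str.isIn x cl)) && (["unit", "per"].any (fun x => PySem.Str.isIn x cl)) then
    m.insert "unit_price" (some col)
  else if (["customer", "client"].any (fun x => PySem.Str.isIn x cl)) && (["id", "no"].any (fun x => PySem.Str.isIn x cl)) then
    m.insert "customer_id" (some col)
  else if (["country", "nation"].any (fun x => PySem.Str.isIn x cl)) then
    m.insert "country" (some col)
  else m

def pvInitA : PySem.Dict String (Option String) :=
  ((((((((PySem.Dict.empty.insert "invoice_no" none).insert "stock_code" none).insert
    "description" none).insert "quantity" none).insert "invoice_date" none).insert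
    "unit_price" none).insert "customer_id" none).insert "country" none)

def create_column_mapping_py (columns : List String) : List (String × Option String) :=
  (columns.foldl pvStepA pvInitA).items

-- ===== PORT B =====
def pvKeys : List String :=
  ["invoice_no", "stock_code", "description", "quantity",
   "invoice_date", "unit_price", "customer_id", "country"]

-- _classify(cl): the standard key a normalised column name belongs to, or None
def pvClassify (cl : String) : Option String :=
  if PySem.Str.isIn "invoice" cl then
    if PySem.Str.isIn "no" cl || (PySem.Str.isIn "number" cl || PySem.Str.isIn "id" cl) then
      some "invoice_no"
    else if PySem.Str.isIn "date" cl || PySem.Str.isIn "time" cl then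
      some "invoice_date"
    else pvClassifyRest cl
  else pvClassifyRest cl
where
  -- fall-through part of _classify (the remaining if/return checks)
  pvClassifyRest (cl : String) : Option String :=
    if (PySem.Str.isIn "stock" cl || (PySem.Str.isIn "item" cl || PySem.Str.isIn "product" cl))
        && (PySem.Str.isIn "code" cl || (PySem.Str.isIn "id" cl || PySem.Str.isIn "no" cl)) then
      some "stock_code"
    else if (PySem.Str.isIn "description" cl || (PySem.Str.isIn "desc" cl || PySem.Str.isIn "name" cl))
        && !(PySem.Str.isIn "customer" cl) then
      some "description"
    else if (PySem.Str.isIn "quantity" cl || PySem.Str.isIn "qty" cl)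
        && !(PySem.Str.isIn "unit" cl) then
      some "quantity"
    else if (PySem.Str.isIn "price" cl || PySem.Str.isIn "cost" cl)
        && (PySem.Str.isIn "unit" cl || PySem.Str.isIn "per" cl) then
      some "unit_price"
    else if (PySem.Str.isIn "customer" cl || PySem.Str.isIn "client" cl)
        && (PySem.Str.isIn "id" cl || PySem.Str.isIn "no" cl) then
      some "customer_id"
    else if PySem.Str.isIn "country" cl || PySem.Str.isIn "nation" cl then
      some "country"
    else none

def create_column_mapping_py_alt (columns : List String) : List (String × Option String) :=
  let tagged := columns.map (fun col => (col, pvClassify (pvColLower col)))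
  pvKeys.map (fun k => (k, (tagged.reverse.find? (fun p => p.2 == some k)).map Prod.fst))

-- ===== PRECONDITION & SPEC =====
def Spec_create_column_mapping_py (columns : List String) (out : List (String × Option String)) : Prop := out = create_column_mapping_py_alt columns
instance (columns : List String) (out : List (String × Option String)) : Decidable (Spec_create_column_mapping_py columns out) := by unfold Spec_create_column_mapping_py; infer_instance

-- ===== CLAIM (what is proved, stated in full; the proofs are below) =====
def Claim_equal_create_column_mapping_py : Prop := ∀ (columns : List String), Dom_create_column_mapping_py columns → Spec_create_column_mapping_py columns (create_column_mapping_py columns)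

-- ===== LEMMAS AND PROOFS =====

-- the fold state of A, parametrised by the current value of every standard key
def pvDictOf (g : String → Option String) : PySem.Dict String (Option String) :=
  PySem.Dict.mk (pvKeys.map (fun k => (k, g k)))

set_option maxHeartbeats 1000000 in
lemma pvInitA_eq : pvInitA = pvDictOf (fun _ => none) := by rfl

-- A's elif chain, branch for branch, equals a dispatch on B's classifier
lemma pvRestChain (m : PySem.Dict String (Option String)) (col cl : String) :
    (if (PySem.Str.isIn "stock" cl || (PySem.Str.isIn "item" cl || PySem.Str.isIn "product" cl))
        && (PySem.Str.isIn "code" cl || (PySem.Str.isIn "id" cl || PySem.Str.isIn "no" cl)) then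
      m.insert "stock_code" (some col)
    else if (PySem.Str.isIn "description" cl || (PySem.Str.isIn "desc" cl || PySem.Str.isIn "name" cl))
        && !(PySem.Str.isIn "customer" cl) then
      m.insert "description" (some col)
    else if (PySem.Str.isIn "quantity" cl || PySem.Str.isIn "qty" cl)
        && !(PySem.Str.isIn "unit" cl) then
      m.insert "quantity" (some col)
    else if (PySem.Str.isIn "price" cl || PySem.Str.isIn "cost" cl)
        && (PySem.Str.isIn "unit" cl || PySem.Str.isIn "per" cl) then
      m.insert "unit_price" (some col)
    else if (PySem.Str.isIn "customer" cl || PySem.Str.isIn "client" cl)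
        && (PySem.Str.isIn "id" cl || PySem.Str.isIn "no" cl) then
      m.insert "customer_id" (some col)
    else if PySem.Str.isIn "country" cl || PySem.Str.isIn "nation" cl then
      m.insert "country" (some col)
    else m)
    = match pvClassify.pvClassifyRest cl with
      | some k => m.insert k (some col)
      | none => m := by
  unfold pvClassify.pvClassifyRest
  split_ifs <;> rfl

lemma pvStepA_classify (m : PySem.Dict String (Option String)) (col : String) :
    pvStepA m col =
      match pvClassify (pvColLower col) with
      | some k => m.insert k (some col)
      | none => m := by
  unfold pvStepA pvClassify
  simp only [List.any_cons, List.any_nil, Bool.or_false]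
  by_cases h1 : PySem.Str.isIn "invoice" (pvColLower col) = true
  · by_cases h2 : (PySem.Str.isIn "no" (pvColLower col) || (PySem.Str.isIn "number" (pvColLower col) || PySem.Str.isIn "id" (pvColLower col))) = true
    · simp only [h1, h2]; rfl
    · by_cases h3 : (PySem.Str.isIn "date" (pvColLower col) || PySem.Str.isIn "time" (pvColLower col)) = true
      · simp only [h1, (Bool.not_eq_true _).mp h2, h3]; rfl
      · simp only [h1, (Bool.not_eq_true _).mp h2, (Bool.not_eq_true _).mp h3,
          Bool.true_and, if_true, if_false, Bool.false_eq_true]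
        exact pvRestChain m col (pvColLower col)
  · simp only [(Bool.not_eq_true _).mp h1, Bool.false_and, if_false, Bool.false_eq_true]
    exact pvRestChain m col (pvColLower col)

set_option maxHeartbeats 1000000 in
lemma pvDictOf_insert (g : String → Option String) (k : String) (v : Option String)
    (hk : k ∈ pvKeys) :
    (pvDictOf g).insert k v = pvDictOf (fun k' => if k' = k then v else g k') := by
  fin_cases hk <;> (apply PySem.Dict.ext; simp [pvDictOf, pvKeys, PySem.Dict.items_insert])

set_option maxHeartbeats 4000000 in
lemma pvFold_dictOf (cols : List String) (g : String → Option String) :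
    cols.foldl pvStepA (pvDictOf g) =
      pvDictOf (fun k =>
        match cols.reverse.find? (fun c => pvClassify (pvColLower c) == some k) with
        | some c => some c
        | none => g k) := by
  induction cols generalizing g with
  | nil => simp
  | cons c cols ih =>
    have hstep : pvStepA (pvDictOf g) c =
        pvDictOf (fun k => if pvClassify (pvColLower c) = some k then some c else g k) := by
      rw [pvStepA_classify]
      cases hcl : pvClassify (pvColLower c) with
      | none => simp [pvDictOf]
      | some k =>
        have hk : k ∈ pvKeys := by
          revert hcl
          unfold pvClassify pvClassify.pvClassifyRest
          split_ifs <;> intro h <;> simp_all [pvKeys]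
        dsimp only
        rw [pvDictOf_insert g k (some c) hk]
        exact congrArg pvDictOf (funext fun k' => by simp [eq_comm])
    rw [List.foldl_cons, hstep, ih]
    refine congrArg pvDictOf (funext fun k => ?_)
    rw [List.reverse_cons]
    cases hfind : cols.reverse.find? (fun x => pvClassify (pvColLower x) == some k) with
    | some c' => simp [List.find?_append, hfind]
    | none =>
      by_cases h : pvClassify (pvColLower c) = some k <;>
        simp [List.find?_append, hfind, h]

-- ===== VERDICT (by name: the statement is the Claim_ definition above) =====
theorem create_column_mapping_py_spec : Claim_equal_create_column_mapping_py := by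
  intro columns _
  unfold Spec_create_column_mapping_py create_column_mapping_py create_column_mapping_py_alt
  rw [pvInitA_eq, pvFold_dictOf]
  dsimp only [pvDictOf, PySem.Dict.items]
  apply List.map_congr_left
  intro k _
  rw [← List.map_reverse, List.find?_map]
  simp only [Function.comp_def]
  cases hfind : columns.reverse.find? (fun c => pvClassify (pvColLower c) == some k) <;>
    simp
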